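-- pv_equiv track=rewrite | github.com/axel92xd/ayed1-2025-tps | TP3/EJ2.py | generar_matriz_e
-- ===== SOURCE A (Python) =====
-- def generar_matriz_e(n: int) -> list[list[int]]:
--     """
--     Genera una matriz con un patrón de 'tablero de ajedrez'.
--     Pre: n > 0.
--     Post: Devuelve una matriz n x n con números consecutivos en las posiciones donde i+j es impar.
--     """
--     matriz = [[0] * n for _ in range(n)]
--     contador = 1
--     for i in range(n):
--         for j in range(n):
--             if (i + j) % 2 != 0:
--                 matriz[i][j] = contador
--                 contador += 1
--     return matriz
-- ===== SOURCE B (Python) =====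
-- def generar_matriz_e(n: int) -> list[list[int]]:
--     half = n // 2
--     odd_n = n % 2
--     return [
--         [
--             (i * half + (i // 2 if odd_n else 0)
--              + (j - (1 if i % 2 == 0 else 0)) // 2 + 1)
--             if (i + j) % 2 != 0 else 0
--             for j in range(n)
--         ]
--         for i in range(n)
--     ]
-- ===== Notes on version B (the rewrite author's own statement) =====
-- stated objective: alternative
-- what changed: Replaces the threaded running counter over all cells by a closed-form rank: each odd-sum cell's value is computed independently from its row base plus its in-row rank, so no state is carried between cells.
import Mathlib
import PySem

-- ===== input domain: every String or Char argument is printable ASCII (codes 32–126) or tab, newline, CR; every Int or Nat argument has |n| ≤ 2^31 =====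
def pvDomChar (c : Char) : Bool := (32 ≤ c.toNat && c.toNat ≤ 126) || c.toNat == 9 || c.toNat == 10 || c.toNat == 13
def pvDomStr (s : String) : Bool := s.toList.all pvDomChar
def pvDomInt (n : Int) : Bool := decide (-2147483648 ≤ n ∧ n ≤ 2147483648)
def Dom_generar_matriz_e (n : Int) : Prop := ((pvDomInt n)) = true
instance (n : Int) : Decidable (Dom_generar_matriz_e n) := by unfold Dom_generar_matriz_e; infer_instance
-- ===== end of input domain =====

-- B removes A's running counter: every odd-sum cell's value is a closed-form rank (alternative decomposition, same cost).

-- ===== PORT A =====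
-- inner loop body: for j in range(n): if (i+j)%2 != 0: write contador, contador += 1
def pvInnerStep (i : Int) (s : List Int × Int) (j : Int) : List Int × Int :=
  if PySem.Int.mod (i + j) 2 ≠ 0 then (s.1 ++ [s.2], s.2 + 1) else (s.1 ++ [0], s.2)

-- outer loop body: build row i (cells start as 0), thread contador
def pvOuterStep (n : Int) (acc : List (List Int) × Int) (i : Int) : List (List Int) × Int :=
  let r := (PySem.List.pyRange 0 n 1).foldl (pvInnerStep i) ([], acc.2)
  (acc.1 ++ [r.1], r.2)

def generar_matriz_e (n : Int) : List (List Int) :=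
  ((PySem.List.pyRange 0 n 1).foldl (pvOuterStep n) ([], 1)).1

-- ===== PORT B =====
def pvBRow (n i : Int) : List Int :=
  (PySem.List.pyRange 0 n 1).map (fun j =>
    if PySem.Int.mod (i + j) 2 ≠ 0 then
      i * PySem.Int.floordiv n 2
        + (if PySem.Int.mod n 2 ≠ 0 then PySem.Int.floordiv i 2 else 0)
        + PySem.Int.floordiv (j - (if PySem.Int.mod i 2 = 0 then 1 else 0)) 2 + 1
    else 0)

def generar_matriz_e_alt (n : Int) : List (List Int) :=
  (PySem.List.pyRange 0 n 1).map (pvBRow n)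

-- ===== PRECONDITION & SPEC =====
def Spec_generar_matriz_e (n : Int) (out : List (List Int)) : Prop := out = generar_matriz_e_alt n
instance (n : Int) (out : List (List Int)) : Decidable (Spec_generar_matriz_e n out) := by unfold Spec_generar_matriz_e; infer_instance

-- ===== CLAIM (what is proved, stated in full; the proofs are below) =====
def Claim_equal_generar_matriz_e : Prop := ∀ (n : Int), Dom_generar_matriz_e n → Spec_generar_matriz_e n (generar_matriz_e n)

-- ===== LEMMAS AND PROOFS =====

lemma pv_mod2 (a : Int) : PySem.Int.mod a 2 = a % 2 :=
  PySem.Int.mod_eq_emod_of_pos (by norm_num)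

lemma pv_div2 (a : Int) : PySem.Int.floordiv a 2 = a / 2 :=
  PySem.Int.floordiv_eq_ediv_of_pos (by norm_num)

-- counter value at the start of row i, minus 1 (number of odd-sum cells in rows < i)
def pvBase (n i : Int) : Int := i * (n / 2) + (if n % 2 ≠ 0 then i / 2 else 0)

-- the inner loop: closed form for the built row and the final counter
lemma pv_inner (i : Int) :
    ∀ b : Int, 0 ≤ b → ∀ (c : Int) (acc : List Int),
    (PySem.List.pyRange 0 b 1).foldl (pvInnerStep i) (acc, c)
      = (acc ++ (PySem.List.pyRange 0 b 1).map
            (fun j => if (i + j) % 2 ≠ 0 then c + (j + i % 2 - 1) / 2 else 0),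
         c + (b + i % 2) / 2) := by
  intro b hb
  induction b, hb using Int.le_induction with
  | base =>
    intro c acc
    rw [PySem.List.pyRange_one_eq_nil (le_refl 0)]
    simp
    omega
  | succ b hb ih =>
    intro c acc
    rw [PySem.List.pyRange_one_succ_right (by omega : (0:Int) ≤ b), List.foldl_append, ih]
    simp only [List.foldl_cons, List.foldl_nil, pvInnerStep, pv_mod2, List.map_append,
      List.map_cons, List.map_nil, List.append_assoc]
    rw [Prod.mk.injEq]
    by_cases h : (i + b) % 2 = 0
    · simp only [h, ne_eq, not_true_eq_false, if_false]
      exact ⟨trivial, by omega⟩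
    · simp only [h, ne_eq, not_false_eq_true, if_true]
      constructor
      · congr 3
        omega
      · omega

-- the outer loop: rows are pvBRow, the counter tracks pvBase
lemma pv_outer (n : Int) (hn : 0 ≤ n) :
    ∀ b : Int, 0 ≤ b → ∀ acc : List (List Int),
    (PySem.List.pyRange 0 b 1).foldl (pvOuterStep n) (acc, 1)
      = (acc ++ (PySem.List.pyRange 0 b 1).map (pvBRow n), pvBase n b + 1) := by
  intro b hb
  induction b, hb using Int.le_induction with
  | base =>
    intro acc
    rw [PySem.List.pyRange_one_eq_nil (le_refl 0)]
    simp [pvBase]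
  | succ b hb ih =>
    intro acc
    rw [PySem.List.pyRange_one_succ_right (by omega : (0:Int) ≤ b), List.foldl_append, ih]
    simp only [List.foldl_cons, List.foldl_nil, pvOuterStep,
      pv_inner b n hn (pvBase n b + 1) [], List.nil_append, List.map_append,
      List.map_cons, List.map_nil, List.append_assoc]
    rw [Prod.mk.injEq]
    constructor
    · have hrow : List.map
          (fun j => if (b + j) % 2 ≠ 0 then pvBase n b + 1 + (j + b % 2 - 1) / 2 else 0)
          (PySem.List.pyRange 0 n 1) = pvBRow n b := by
        unfold pvBRow
        apply List.map_congr_left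
        intro j _
        simp only [pv_mod2, pv_div2, pvBase]
        by_cases h : (b + j) % 2 = 0
        · simp [h]
        · simp only [h, ne_eq, not_false_eq_true, if_true]
          by_cases hb2 : b % 2 = 0 <;> by_cases hn2 : n % 2 = 0 <;>
            simp [hb2, hn2] <;> omega
      rw [hrow]
    · have hmul : (b + 1) * (n / 2) = b * (n / 2) + n / 2 := by ring
      unfold pvBase
      by_cases hn2 : n % 2 = 0 <;> simp [hn2] <;> omega

lemma pv_main (n : Int) : generar_matriz_e n = generar_matriz_e_alt n := by
  by_cases hn : 0 ≤ n
  · unfold generar_matriz_e generar_matriz_e_alt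
    rw [pv_outer n hn n hn []]
    simp
  · unfold generar_matriz_e generar_matriz_e_alt
    rw [PySem.List.pyRange_one_eq_nil (by omega : n ≤ 0)]
    simp

-- ===== VERDICT (by name: the statement is the Claim_ definition above) =====
theorem generar_matriz_e_spec : Claim_equal_generar_matriz_e := by
  intro n _
  unfold Spec_generar_matriz_e
  exact pv_main n
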